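-- pv_equiv track=rewrite | github.com/ZhongyueZhang785/UserRecommend-System | web/fastapi-qr/app/service/QR_Encode.py | make_QR_version1
-- ===== SOURCE A (Python) =====
-- def makeVersion1():
--     return [[1, 1, 1, 1, 1, 1, 1, 0, 0, 2, 2, 2, 2, 0, 1, 1, 1, 1, 1, 1, 1],
--  [1, 0, 0, 0, 0, 0, 1, 0, 0, 2, 2, 2, 2, 0, 1, 0, 0, 0, 0, 0, 1],
--  [1, 0, 1, 1, 1, 0, 1, 0, 0, 2, 2, 2, 2, 0, 1, 0, 1, 1, 1, 0, 1],
--  [1, 0, 1, 1, 1, 0, 1, 0, 0, 2, 2, 2, 2, 0, 1, 0, 1, 1, 1, 0, 1],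
--  [1, 0, 1, 1, 1, 0, 1, 0, 0, 2, 2, 2, 2, 0, 1, 0, 1, 1, 1, 0, 1],
--  [1, 0, 0, 0, 0, 0, 1, 0, 0, 2, 2, 2, 2, 0, 1, 0, 0, 0, 0, 0, 1],
--  [1, 1, 1, 1, 1, 1, 1, 0, 1, 0, 1, 0, 1, 0, 1, 1, 1, 1, 1, 1, 1],
--  [0, 0, 0, 0, 0, 0, 0, 0, 0, 2, 2, 2, 2, 0, 0, 0, 0, 0, 0, 0, 0],
--  [2, 2, 2, 2, 2, 2, 1, 2, 2, 2, 2, 2, 2, 2, 2, 2, 2, 2, 2, 2, 2],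
--  [2, 2, 2, 2, 2, 2, 0, 2, 2, 2, 2, 2, 2, 2, 2, 2, 2, 2, 2, 2, 2],
--  [2, 2, 2, 2, 2, 2, 1, 2, 2, 2, 2, 2, 2, 2, 2, 2, 2, 2, 2, 2, 2],
--  [2, 2, 2, 2, 2, 2, 0, 2, 2, 2, 2, 2, 2, 2, 2, 2, 2, 2, 2, 2, 2],
--  [2, 2, 2, 2, 2, 2, 1, 2, 2, 2, 2, 2, 2, 2, 2, 2, 2, 2, 2, 2, 2],
--  [0, 0, 0, 0, 0, 0, 0, 0, 0, 2, 2, 2, 2, 2, 2, 2, 2, 2, 2, 2, 2],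
--  [1, 1, 1, 1, 1, 1, 1, 0, 0, 2, 2, 2, 2, 2, 2, 2, 2, 2, 2, 2, 2],
--  [1, 0, 0, 0, 0, 0, 1, 0, 0, 2, 2, 2, 2, 2, 2, 2, 2, 2, 2, 2, 2],
--  [1, 0, 1, 1, 1, 0, 1, 0, 0, 2, 2, 2, 2, 2, 2, 2, 2, 2, 2, 2, 2],
--  [1, 0, 1, 1, 1, 0, 1, 0, 0, 2, 2, 2, 2, 2, 2, 2, 2, 2, 2, 2, 2],
--  [1, 0, 1, 1, 1, 0, 1, 0, 0, 2, 2, 2, 2, 2, 2, 2, 2, 2, 2, 2, 2],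
--  [1, 0, 0, 0, 0, 0, 1, 0, 0, 2, 2, 2, 2, 2, 2, 2, 2, 2, 2, 2, 2],
--  [1, 1, 1, 1, 1, 1, 1, 0, 0, 2, 2, 2, 2, 2, 2, 2, 2, 2, 2, 2, 2]]
--
-- def append_to_white_space(payload_bit_array):
--     range_index = range(int((375 - len(payload_bit_array)) / 8) + 1)
--     for i in range_index:
--         if i % 2 == 0:
--             payload_bit_array=payload_bit_array+[1,1,1,0,1,1,0,0]
--         else:
--             payload_bit_array=payload_bit_array+[0,0,0,1,0,0,0,1]
--     return payload_bit_array
--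
-- def make_QR_version1(payload_bit_array):
--     qr = makeVersion1()
--     # append 11101100 00010001 to white space
--     payload_bit_array = append_to_white_space(payload_bit_array)
--     for zig_col in range(10, 0, -1):
--         # if even then move up else down
--         if zig_col % 2:
--             row_range = range(0, 21, 1)
--         else:
--             row_range = range(20, -1, -1)
--         # skip the col timing patterns
--         if zig_col < 4:
--             zig_col_left = zig_col * 2 - 2
--             zig_col_right = zig_col * 2 - 1
--         else:
--             zig_col_left = zig_col * 2 - 1
--             zig_col_right = zig_col * 2
--         for row in row_range:
--             if (qr[row][zig_col_left] + qr[row][zig_col_right]) == 4: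
--                 qr[row][zig_col_right] = int(payload_bit_array.pop(0))
--                 qr[row][zig_col_left] = int(payload_bit_array.pop(0))
--
--     return qr
-- ===== SOURCE B (Python) =====
-- def template_cell(r, c):
--     # version-1 scaffold computed from QR structure: finder patterns, timing, reserved zeros
--     for r0, c0 in ((0, 0), (0, 14), (14, 0)):
--         if r0 <= r < r0 + 7 and c0 <= c < c0 + 7:
--             dr, dc = r - r0, c - c0
--             return 1 if dr in (0, 6) or dc in (0, 6) or (2 <= dr <= 4 and 2 <= dc <= 4) else 0
--     if r == 6 or c == 6:
--         return (r + c + 1) % 2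
--     if (r <= 7 and (c <= 8 or c >= 13)) or (r >= 13 and c <= 8):
--         return 0
--     return 2
--
-- def is_data(r, c):
--     return template_cell(r, c) == 2
--
-- def fill_order():
--     # ordered coordinates of the data cells: zig-zag column pairs, right cell before left
--     order = []
--     for zig_col in range(10, 0, -1):
--         rows = range(21) if zig_col % 2 else range(20, -1, -1)
--         left = zig_col * 2 - 2 if zig_col < 4 else zig_col * 2 - 1
--         right = left + 1
--         for row in rows:
--             if is_data(row, left) and is_data(row, right):
--                 order.append((row, right))
--                 order.append((row, left))
--     return order
--
-- def pad_payload(payload_bit_array):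
--     n = int((375 - len(payload_bit_array)) / 8) + 1
--     blocks = ([1, 1, 1, 0, 1, 1, 0, 0], [0, 0, 0, 1, 0, 0, 0, 1])
--     return payload_bit_array + [bit for i in range(n) for bit in blocks[i % 2]]
--
-- def make_QR_version1(payload_bit_array):
--     bits = pad_payload(payload_bit_array)
--     idx = {}
--     for i, pos in enumerate(fill_order()):
--         idx[pos] = i
--     return [[int(bits[idx[(r, c)]]) if (r, c) in idx else template_cell(r, c)
--              for c in range(21)] for r in range(21)]
-- ===== Notes on version B (the rewrite author's own statement) =====
-- stated objective: alternative
-- what changed: B computes the version-1 scaffold cell-by-cell from the QR structure instead of storing the 21x21 template, derives the ordered data-cell coordinate list from that predicate, builds a position-to-bit-index dict once, and constructs the output grid functionally by indexing into the padded bit list, replacing A's interleaved mutate-scan-and-pop fill.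
import Mathlib
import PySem

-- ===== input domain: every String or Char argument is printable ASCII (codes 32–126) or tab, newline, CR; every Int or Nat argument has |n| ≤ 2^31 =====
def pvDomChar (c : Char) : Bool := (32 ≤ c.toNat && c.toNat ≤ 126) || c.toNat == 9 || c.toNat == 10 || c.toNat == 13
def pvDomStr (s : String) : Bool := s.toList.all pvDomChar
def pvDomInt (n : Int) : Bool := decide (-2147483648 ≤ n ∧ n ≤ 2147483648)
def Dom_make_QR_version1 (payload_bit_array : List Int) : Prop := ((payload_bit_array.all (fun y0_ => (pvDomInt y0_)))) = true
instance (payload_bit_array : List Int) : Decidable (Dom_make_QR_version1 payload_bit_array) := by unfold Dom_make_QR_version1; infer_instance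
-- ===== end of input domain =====

-- B fills the grid by indexing instead of streaming: it computes the version-1 scaffold cell-wise
-- from the QR structure (no stored template), builds a position->bit-index dict once, and constructs
-- the output grid functionally; RETURN values are proved equal (objective: alternative). Side effect
-- of A only: for payloads of length >= 383 (no padding appended) A pops the first 224 elements off
-- the caller's list; B never mutates its argument.

-- ===== PORT A =====
-- makeVersion1()
def pvTemplate : List (List Int) :=
  [[1, 1, 1, 1, 1, 1, 1, 0, 0, 2, 2, 2, 2, 0, 1, 1, 1, 1, 1, 1, 1],
   [1, 0, 0, 0, 0, 0, 1, 0, 0, 2, 2, 2, 2, 0, 1, 0, 0, 0, 0, 0, 1],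
   [1, 0, 1, 1, 1, 0, 1, 0, 0, 2, 2, 2, 2, 0, 1, 0, 1, 1, 1, 0, 1],
   [1, 0, 1, 1, 1, 0, 1, 0, 0, 2, 2, 2, 2, 0, 1, 0, 1, 1, 1, 0, 1],
   [1, 0, 1, 1, 1, 0, 1, 0, 0, 2, 2, 2, 2, 0, 1, 0, 1, 1, 1, 0, 1],
   [1, 0, 0, 0, 0, 0, 1, 0, 0, 2, 2, 2, 2, 0, 1, 0, 0, 0, 0, 0, 1],
   [1, 1, 1, 1, 1, 1, 1, 0, 1, 0, 1, 0, 1, 0, 1, 1, 1, 1, 1, 1, 1],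
   [0, 0, 0, 0, 0, 0, 0, 0, 0, 2, 2, 2, 2, 0, 0, 0, 0, 0, 0, 0, 0],
   [2, 2, 2, 2, 2, 2, 1, 2, 2, 2, 2, 2, 2, 2, 2, 2, 2, 2, 2, 2, 2],
   [2, 2, 2, 2, 2, 2, 0, 2, 2, 2, 2, 2, 2, 2, 2, 2, 2, 2, 2, 2, 2],
   [2, 2, 2, 2, 2, 2, 1, 2, 2, 2, 2, 2, 2, 2, 2, 2, 2, 2, 2, 2, 2],
   [2, 2, 2, 2, 2, 2, 0, 2, 2, 2, 2, 2, 2, 2, 2, 2, 2, 2, 2, 2, 2],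
   [2, 2, 2, 2, 2, 2, 1, 2, 2, 2, 2, 2, 2, 2, 2, 2, 2, 2, 2, 2, 2],
   [0, 0, 0, 0, 0, 0, 0, 0, 0, 2, 2, 2, 2, 2, 2, 2, 2, 2, 2, 2, 2],
   [1, 1, 1, 1, 1, 1, 1, 0, 0, 2, 2, 2, 2, 2, 2, 2, 2, 2, 2, 2, 2],
   [1, 0, 0, 0, 0, 0, 1, 0, 0, 2, 2, 2, 2, 2, 2, 2, 2, 2, 2, 2, 2],
   [1, 0, 1, 1, 1, 0, 1, 0, 0, 2, 2, 2, 2, 2, 2, 2, 2, 2, 2, 2, 2],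
   [1, 0, 1, 1, 1, 0, 1, 0, 0, 2, 2, 2, 2, 2, 2, 2, 2, 2, 2, 2, 2],
   [1, 0, 1, 1, 1, 0, 1, 0, 0, 2, 2, 2, 2, 2, 2, 2, 2, 2, 2, 2, 2],
   [1, 0, 0, 0, 0, 0, 1, 0, 0, 2, 2, 2, 2, 2, 2, 2, 2, 2, 2, 2, 2],
   [1, 1, 1, 1, 1, 1, 1, 0, 0, 2, 2, 2, 2, 2, 2, 2, 2, 2, 2, 2, 2]]

-- append_to_white_space in Source A.  int((375 - len)/8): float division by 8 is exact, int()
-- truncates toward zero = PySem.Int.truncdiv (exact for list lengths < 2^53).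
def appendToWhiteSpace (payload_bit_array : List Int) : List Int :=
  (PySem.List.pyRange 0 (PySem.Int.truncdiv (375 - (payload_bit_array.length : Int)) 8 + 1) 1).foldl
    (fun acc i =>
      if PySem.Int.mod i 2 = 0 then acc ++ [1, 1, 1, 0, 1, 1, 0, 0]
      else acc ++ [0, 0, 0, 1, 0, 0, 0, 1])
    payload_bit_array

-- body of A's inner row loop (one 'for row in row_range' iteration), state = (qr, payload bits).
-- payload.pop(0) is ported as headD 0 / tail: the padded list always holds >= 376 bits when the
-- payload has < 376 bits and otherwise keeps all its >= 376 bits, while the loops pop exactly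
-- 2 * 112 = 224 times, so Python's pop(0) never raises and the default 0 is never read.
def pvFARow (zig_col_left zig_col_right : Int) (st : List (List Int) × List Int) (row : Int) :
    List (List Int) × List Int :=
  let qr := st.1
  let rowL := PySem.List.pyGetD qr row []
  if PySem.List.pyGetD rowL zig_col_left 0 + PySem.List.pyGetD rowL zig_col_right 0 = 4 then
    let b1 := st.2.headD 0
    let bits := st.2.tail
    let qr := PySem.List.pySetD qr row
                (PySem.List.pySetD (PySem.List.pyGetD qr row []) zig_col_right b1)
    let b2 := bits.headD 0
    let qr := PySem.List.pySetD qr row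
                (PySem.List.pySetD (PySem.List.pyGetD qr row []) zig_col_left b2)
    (qr, bits.tail)
  else st

-- body of A's outer loop ('for zig_col in range(10, 0, -1)')
def pvFA (st : List (List Int) × List Int) (zig_col : Int) : List (List Int) × List Int :=
  let row_range := if PySem.Int.mod zig_col 2 ≠ 0 then PySem.List.pyRange 0 21 1
                   else PySem.List.pyRange 20 (-1) (-1)
  let zig_col_left  := if zig_col < 4 then zig_col * 2 - 2 else zig_col * 2 - 1
  let zig_col_right := if zig_col < 4 then zig_col * 2 - 1 else zig_col * 2
  row_range.foldl (pvFARow zig_col_left zig_col_right) st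

def make_QR_version1 (payload_bit_array : List Int) : List (List Int) :=
  ((PySem.List.pyRange 10 0 (-1)).foldl pvFA
    (pvTemplate, appendToWhiteSpace payload_bit_array)).1

-- ===== PORT B =====
-- template_cell(r, c): the version-1 scaffold computed cell-wise; the Python 'for r0, c0 in (...)'
-- with an early return is ported as the same three membership tests in order.
def pvFinderVal (dr dc : Int) : Int :=
  if dr = 0 ∨ dr = 6 ∨ dc = 0 ∨ dc = 6 ∨ (2 ≤ dr ∧ dr ≤ 4 ∧ 2 ≤ dc ∧ dc ≤ 4) then 1 else 0

def tmplCell (r c : Int) : Int :=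
  if 0 ≤ r ∧ r < 7 ∧ 0 ≤ c ∧ c < 7 then pvFinderVal (r - 0) (c - 0)
  else if 0 ≤ r ∧ r < 7 ∧ 14 ≤ c ∧ c < 21 then pvFinderVal (r - 0) (c - 14)
  else if 14 ≤ r ∧ r < 21 ∧ 0 ≤ c ∧ c < 7 then pvFinderVal (r - 14) (c - 0)
  else if r = 6 ∨ c = 6 then PySem.Int.mod (r + c + 1) 2
  else if (r ≤ 7 ∧ (c ≤ 8 ∨ 13 ≤ c)) ∨ (13 ≤ r ∧ c ≤ 8) then 0
  else 2

-- fill_order(): 'is_data(row, left) and is_data(row, right)' inlined as the two equality tests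
def fillOrder : List (Int × Int) :=
  (PySem.List.pyRange 10 0 (-1)).foldl
    (fun order zig_col =>
      let rows := if PySem.Int.mod zig_col 2 ≠ 0 then PySem.List.pyRange 0 21 1
                  else PySem.List.pyRange 20 (-1) (-1)
      let left := if zig_col < 4 then zig_col * 2 - 2 else zig_col * 2 - 1
      let right := left + 1
      rows.foldl
        (fun order row =>
          if tmplCell row left = 2 ∧ tmplCell row right = 2 then
            (order ++ [(row, right)]) ++ [(row, left)]
          else order)
        order)
    []

-- pad_payload: 'blocks[i % 2]' (i % 2 ∈ {0,1}) ported as the two-way branch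
def padPayload (payload_bit_array : List Int) : List Int :=
  let n := PySem.Int.truncdiv (375 - (payload_bit_array.length : Int)) 8 + 1
  payload_bit_array ++
    (PySem.List.pyRange 0 n 1).flatMap
      (fun i => if PySem.Int.mod i 2 = 0 then [1, 1, 1, 0, 1, 1, 0, 0] else [0, 0, 0, 1, 0, 0, 0, 1])

-- '(r, c) in idx' then 'bits[idx[(r, c)]]' is the single lookup match; bits[i] is pyGetD with
-- default 0, unreachable since every stored index is < 224 <= len(bits).
def make_QR_version1_alt (payload_bit_array : List Int) : List (List Int) :=
  let bits := padPayload payload_bit_array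
  let idx : PySem.Dict (Int × Int) Int :=
    (PySem.List.enumerate fillOrder 0).foldl (fun d iv => d.insert iv.2 iv.1) PySem.Dict.empty
  (PySem.List.pyRange 0 21 1).map (fun r =>
    (PySem.List.pyRange 0 21 1).map (fun c =>
      match idx.get? (r, c) with
      | some i => PySem.List.pyGetD bits i 0
      | none => tmplCell r c))

-- ===== PRECONDITION & SPEC =====
def Spec_make_QR_version1 (payload_bit_array : List Int) (out : List (List Int)) : Prop := out = make_QR_version1_alt payload_bit_array
instance (payload_bit_array : List Int) (out : List (List Int)) : Decidable (Spec_make_QR_version1 payload_bit_array out) := by unfold Spec_make_QR_version1; infer_instance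

-- ===== CLAIM =====
def Claim_equal_make_QR_version1 : Prop := ∀ (payload_bit_array : List Int), Dom_make_QR_version1 payload_bit_array → Spec_make_QR_version1 payload_bit_array (make_QR_version1 payload_bit_array)

-- ===== LEMMAS AND PROOFS =====
set_option maxRecDepth 40000
set_option maxHeartbeats 4000000
-- Proof plan: (1) A's interleaved scan-and-fill equals a sequential write of the popped bits along
-- the concrete position list pvPSLit (invariant: the columns not yet visited still read like the
-- template, so A's '== 4' test matches the template test that defines the positions);
-- (2) a sequential write along a nodup position list reads back as 'the i-th remaining bit at the
-- i-th position, template elsewhere' (pvFoldl_read); (3) B's dict lookup agrees with the position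
-- index and B's computed scaffold agrees with the template, both checked by 'decide' over the
-- 21 x 21 cells; the two descriptions then agree pointwise.

-- sequential write of the head bit at one position, state = (grid, bits)
def pvFB (st : List (List Int) × List Int) (rc : Int × Int) : List (List Int) × List Int :=
  (PySem.List.pySetD st.1 rc.1
     (PySem.List.pySetD (PySem.List.pyGetD st.1 rc.1 []) rc.2 (st.2.headD 0)),
   st.2.tail)

-- the value the Python reads as qr[row][col] (defaults never reached in-range)
def pvRead (g : List (List Int)) (row col : Int) : Int :=
  PySem.List.pyGetD (PySem.List.pyGetD g row []) col 0

def pvShape (g : List (List Int)) : Prop := g.length = 21 ∧ ∀ r ∈ g, r.length = 21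

-- first index of a coordinate in a position list
def pvFind (q : Int × Int) : List (Int × Int) → Option Nat
  | [] => none
  | p :: ps => if p = q then some 0 else (pvFind q ps).map (· + 1)

-- the position chunk of one column pair, right cell then left cell of each data row
def pvChunkOf (zl zr : Int) : List Int → List (Int × Int)
  | [] => []
  | row :: rows =>
      (if pvRead pvTemplate row zl + pvRead pvTemplate row zr = 4
        then [(row, zr), (row, zl)] else []) ++ pvChunkOf zl zr rows

def pvRowsU : List Int := [0, 1, 2, 3, 4, 5, 6, 7, 8, 9, 10, 11, 12, 13, 14, 15, 16, 17, 18, 19, 20]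
def pvRowsD : List Int := [20, 19, 18, 17, 16, 15, 14, 13, 12, 11, 10, 9, 8, 7, 6, 5, 4, 3, 2, 1, 0]

-- the full ordered position list, as the A-side chunk concatenation and as a literal
def pvPS : List (Int × Int) := pvChunkOf 19 20 pvRowsD ++ (pvChunkOf 17 18 pvRowsU ++ (pvChunkOf 15 16 pvRowsD ++ (pvChunkOf 13 14 pvRowsU ++ (pvChunkOf 11 12 pvRowsD ++ (pvChunkOf 9 10 pvRowsU ++ (pvChunkOf 7 8 pvRowsD ++ (pvChunkOf 4 5 pvRowsU ++ (pvChunkOf 2 3 pvRowsD ++ (pvChunkOf 0 1 pvRowsU)))))))))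

def pvPSLit : List (Int × Int) := [(20, 20), (20, 19), (19, 20), (19, 19), (18, 20), (18, 19), (17, 20), (17, 19), (16, 20), (16, 19), (15, 20), (15, 19), (14, 20), (14, 19), (13, 20), (13, 19), (12, 20), (12, 19), (11, 20), (11, 19), (10, 20), (10, 19), (9, 20), (9, 19), (8, 20), (8, 19), (8, 18), (8, 17), (9, 18), (9, 17), (10, 18), (10, 17), (11, 18), (11, 17), (12, 18), (12, 17), (13, 18), (13, 17), (14, 18), (14, 17), (15, 18), (15, 17), (16, 18), (16, 17), (17, 18), (17, 17), (18, 18), (18, 17), (19, 18), (19, 17), (20, 18), (20, 17), (20, 16), (20, 15), (19, 16), (19, 15), (18, 16), (18, 15), (17, 16), (17, 15), (16, 16), (16, 15), (15, 16), (15, 15), (14, 16), (14, 15), (13, 16), (13, 15), (12, 16), (12, 15), (11, 16), (11, 15), (10, 16), (10, 15), (9, 16), (9, 15), (8, 16), (8, 15), (8, 14), (8, 13), (9, 14), (9, 13), (10, 14), (10, 13), (11, 14), (11, 13), (12, 14), (12, 13), (13, 14), (13, 13), (14, 14), (14, 13), (15, 14), (15, 13), (16, 14), (16, 13), (17, 14),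 (17, 13), (18, 14), (18, 13), (19, 14), (19, 13), (20, 14), (20, 13), (20, 12), (20, 11), (19, 12), (19, 11), (18, 12), (18, 11), (17, 12), (17, 11), (16, 12), (16, 11), (15, 12), (15, 11), (14, 12), (14, 11), (13, 12), (13, 11), (12, 12), (12, 11), (11, 12), (11, 11), (10, 12), (10, 11), (9, 12), (9, 11), (8, 12), (8, 11), (7, 12), (7, 11), (5, 12), (5, 11), (4, 12), (4, 11), (3, 12), (3, 11), (2, 12), (2, 11), (1, 12), (1, 11), (0, 12), (0, 11), (0, 10), (0, 9), (1, 10), (1, 9), (2, 10), (2, 9), (3, 10), (3, 9), (4, 10), (4, 9), (5, 10), (5, 9), (7, 10), (7, 9), (8, 10), (8, 9), (9, 10), (9, 9), (10, 10), (10, 9), (11, 10), (11, 9), (12, 10), (12, 9), (13, 10), (13, 9), (14, 10), (14, 9), (15, 10), (15, 9), (16, 10), (16, 9), (17, 10), (17, 9), (18, 10), (18, 9), (19, 10), (19, 9), (20, 10), (20, 9), (12, 8), (12, 7), (11, 8), (11, 7), (10, 8), (10, 7), (9, 8), (9, 7), (8, 8), (8, 7), (8, 5), (8, 4), (9, 5),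 (9, 4), (10, 5), (10, 4), (11, 5), (11, 4), (12, 5), (12, 4), (12, 3), (12, 2), (11, 3), (11, 2), (10, 3), (10, 2), (9, 3), (9, 2), (8, 3), (8, 2), (8, 1), (8, 0), (9, 1), (9, 0), (10, 1), (10, 0), (11, 1), (11, 0), (12, 1), (12, 0)]

-- B's position->index dict, the closed value of the 'idx' loop in make_QR_version1_alt
def pvIdxDict : PySem.Dict (Int × Int) Int :=
  (PySem.List.enumerate fillOrder 0).foldl (fun d iv => d.insert iv.2 iv.1) PySem.Dict.empty


theorem pvShape_template : pvShape pvTemplate := by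
  unfold pvShape pvTemplate; decide

theorem pvRow_mem {g : List (List Int)} (hs : pvShape g) {r : Int} (h0 : 0 ≤ r) (h1 : r < 21) :
    PySem.List.pyGetD g r ([] : List Int) ∈ g := by
  obtain ⟨hlen, _⟩ := hs
  rw [PySem.List.pyGetD_eq_getElem _ _ h0 (by omega)]
  exact List.getElem_mem _

theorem pvShape_pvFB (st : (List (List Int)) × List Int) (r c : Int) (hs : pvShape st.1)
    (h0 : 0 ≤ r) (h1 : r < 21) : pvShape (pvFB st (r, c)).1 := by
  obtain ⟨hlen, hrows⟩ := hs
  refine ⟨?_, ?_⟩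
  · simp [pvFB, PySem.List.length_pySetD, hlen]
  · intro row hm
    simp only [pvFB] at hm
    rw [PySem.List.pySetD_of_nonneg _ _ h0] at hm
    rcases List.mem_or_eq_of_mem_set hm with h | h
    · exact hrows _ h
    · subst h
      rw [PySem.List.length_pySetD]
      exact hrows _ (pvRow_mem ⟨hlen, hrows⟩ h0 h1)

theorem pvRead_pvFB_ne (st : (List (List Int)) × List Int) (r c row col : Int)
    (hs : pvShape st.1) (hr0 : 0 ≤ r) (hr1 : r < 21) (hc0 : 0 ≤ c) (hc1 : c < 21)
    (h0 : 0 ≤ row) (h1 : row < 21) (h2 : 0 ≤ col) (h3 : col < 21)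
    (hne : row ≠ r ∨ col ≠ c) :
    pvRead (pvFB st (r, c)).1 row col = pvRead st.1 row col := by
  obtain ⟨hlen, hrows⟩ := hs
  have hrowlen : ∀ q : Int, 0 ≤ q → q < 21 → (PySem.List.pyGetD st.1 q ([] : List Int)).length = 21 :=
    fun q hq0 hq1 => hrows _ (pvRow_mem ⟨hlen, hrows⟩ hq0 hq1)
  simp only [pvFB, pvRead]
  rw [PySem.List.pySetD_of_nonneg _ _ hr0]
  by_cases hrr : row = r
  · subst hrr
    have hcne : col ≠ c := hne.resolve_left (fun hh => hh rfl)
    have hql : st.1[row.toNat].length = 21 := by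
      have := hrowlen row h0 h1
      rwa [PySem.List.pyGetD_eq_getElem _ _ h0 (by omega)] at this
    rw [PySem.List.pyGetD_eq_getElem _ _ h0 (by rw [List.length_set]; omega),
        PySem.List.pyGetD_eq_getElem _ _ h0 (by omega)]
    rw [List.getElem_set_self, PySem.List.pySetD_of_nonneg _ _ hc0]
    rw [PySem.List.pyGetD_eq_getElem _ _ h2 (by rw [List.length_set, hql]; omega)]
    rw [List.getElem_set_ne (by omega)]
    rw [PySem.List.pyGetD_eq_getElem _ _ h2 (by rw [hql]; omega)]
  · rw [PySem.List.pyGetD_eq_getElem _ _ h0 (by rw [List.length_set]; omega),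
        PySem.List.pyGetD_eq_getElem _ _ h0 (by omega)]
    rw [List.getElem_set_ne (by omega)]

theorem pvRead_pvFB_self (st : (List (List Int)) × List Int) (r c : Int)
    (hs : pvShape st.1) (hr0 : 0 ≤ r) (hr1 : r < 21) (hc0 : 0 ≤ c) (hc1 : c < 21) :
    pvRead (pvFB st (r, c)).1 r c = st.2.headD 0 := by
  obtain ⟨hlen, hrows⟩ := hs
  have hql : st.1[r.toNat].length = 21 := by
    have := hrows _ (pvRow_mem ⟨hlen, hrows⟩ hr0 hr1)
    rwa [PySem.List.pyGetD_eq_getElem _ _ hr0 (by omega)] at this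
  simp only [pvFB, pvRead]
  rw [PySem.List.pySetD_of_nonneg _ _ hr0]
  rw [PySem.List.pyGetD_eq_getElem _ _ hr0 (by rw [List.length_set]; omega)]
  rw [List.getElem_set_self, PySem.List.pySetD_of_nonneg _ _ hc0]
  rw [PySem.List.pyGetD_eq_getElem _ _ hc0 (by rw [List.length_set, PySem.List.pyGetD_eq_getElem _ _ hr0 (by omega), hql]; omega)]
  rw [List.getElem_set_self]

theorem pvShape_foldl (ps : List (Int × Int)) : ∀ (st : (List (List Int)) × List Int),
    pvShape st.1 → (∀ p ∈ ps, 0 ≤ p.1 ∧ p.1 < 21) →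
    pvShape (List.foldl pvFB st ps).1 := by
  induction ps with
  | nil => intro st hs _; exact hs
  | cons p ps ih =>
      intro st hs hb
      rw [List.foldl_cons]
      have hp := hb p (List.mem_cons_self)
      exact ih _ (pvShape_pvFB st p.1 p.2 hs hp.1 hp.2) (fun q hq => hb q (List.mem_cons_of_mem _ hq))

theorem pvFind_none_of_not_mem (q : Int × Int) : ∀ (ps : List (Int × Int)), q ∉ ps → pvFind q ps = none := by
  intro ps
  induction ps with
  | nil => intro _; rfl
  | cons p ps ih =>
      intro h
      have hpq : ¬ p = q := fun he => h (by rw [← he]; exact List.mem_cons_self)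
      rw [pvFind, if_neg hpq, ih (fun hm => h (List.mem_cons_of_mem _ hm))]
      rfl

-- reading back after a sequential write along a nodup position list
theorem pvFoldl_read (ps : List (Int × Int)) : ∀ (st : (List (List Int)) × List Int),
    pvShape st.1 → (∀ p ∈ ps, 0 ≤ p.1 ∧ p.1 < 21 ∧ 0 ≤ p.2 ∧ p.2 < 21) → ps.Nodup →
    ∀ r c : Int, 0 ≤ r → r < 21 → 0 ≤ c → c < 21 →
    pvRead (List.foldl pvFB st ps).1 r c =
      (match pvFind (r, c) ps with
       | some i => (st.2.drop i).headD 0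
       | none => pvRead st.1 r c) := by
  induction ps with
  | nil => intro st _ _ _ r c _ _ _ _; rfl
  | cons p ps ih =>
      intro st hs hb hnd r c h0 h1 h2 h3
      obtain ⟨hp1, hp2, hp3, hp4⟩ := hb p (List.mem_cons_self)
      have hs' : pvShape (pvFB st p).1 := pvShape_pvFB st p.1 p.2 hs hp1 hp2
      have hbt := fun q hq => hb q (List.mem_cons_of_mem _ hq)
      have hndt := (List.nodup_cons.mp hnd).2
      rw [List.foldl_cons,
          ih (pvFB st p) hs' hbt hndt r c h0 h1 h2 h3]
      by_cases hpq : p = (r, c)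
      · subst hpq
        rw [pvFind_none_of_not_mem _ ps (List.nodup_cons.mp hnd).1]
        rw [pvFind, if_pos rfl]
        simpa [List.drop_zero] using pvRead_pvFB_self st r c hs hp1 hp2 hp3 hp4
      · rw [pvFind, if_neg hpq]
        cases hfi : pvFind (r, c) ps with
        | none =>
            simp only [Option.map_none]
            refine pvRead_pvFB_ne st p.1 p.2 r c hs hp1 hp2 hp3 hp4 h0 h1 h2 h3 ?_
            rcases eq_or_ne r p.1 with e1 | e1
            · rcases eq_or_ne c p.2 with e2 | e2
              · exact absurd (Prod.ext_iff.mpr ⟨e1.symm, e2.symm⟩) hpq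
              · exact Or.inr e2
            · exact Or.inl e1
        | some i =>
            simp only [Option.map_some]
            show ((pvFB st p).2.drop i).headD 0 = (st.2.drop (i + 1)).headD 0
            have ht : (pvFB st p).2 = st.2.drop 1 := by
              show st.2.tail = st.2.drop 1
              exact (List.drop_one).symm
            rw [ht, List.drop_drop, Nat.add_comm 1 i]

-- bits[i] with a nonnegative index and default 0 is the head of the i-th drop
theorem pvGetD_drop (l : List Int) (n : Nat) :
    PySem.List.pyGetD l ((n : Nat) : Int) 0 = (l.drop n).headD 0 := by
  rw [PySem.List.pyGetD_natCast]
  induction l generalizing n with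
  | nil => cases n <;> rfl
  | cons x xs ih => cases n with
      | zero => rfl
      | succ m => simp only [List.getD_cons_succ, List.drop_succ_cons]; exact ih m

-- the concrete facts about the position list and the computed scaffold, checked by decide
theorem pvPS_lit : pvPS = pvPSLit := by decide
theorem pvPS_bound : ∀ p ∈ pvPSLit, 0 ≤ p.1 ∧ p.1 < 21 ∧ 0 ≤ p.2 ∧ p.2 < 21 := by decide
theorem pvPS_nodup : pvPSLit.Nodup := by decide
theorem pvFO_lit : fillOrder = pvPSLit := by decide

-- the dict built by B's enumerate-insert loop looks up exactly the first index in the list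
theorem pvDictFold_get? (q : Int × Int) : ∀ (ps : List (Int × Int)) (s : Int) (d : PySem.Dict (Int × Int) Int),
    ps.Nodup →
    ((PySem.List.enumerate ps s).foldl (fun d iv => d.insert iv.2 iv.1) d).get? q =
      (match pvFind q ps with
       | some i => some (s + (i : Int))
       | none => d.get? q) := by
  intro ps
  induction ps with
  | nil => intro s d _; rfl
  | cons p ps ih =>
      intro s d hnd
      rw [PySem.List.enumerate_cons, List.foldl_cons]
      rw [ih (s + 1) (d.insert p s) (List.nodup_cons.mp hnd).2]
      by_cases hpq : p = q
      · subst hpq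
        rw [pvFind_none_of_not_mem _ ps (List.nodup_cons.mp hnd).1]
        rw [pvFind, if_pos rfl]
        simp [PySem.Dict.get?_insert_self]
      · rw [pvFind, if_neg hpq]
        cases hf : pvFind q ps with
        | none =>
            simp only [Option.map_none]
            apply PySem.Dict.get?_insert_of_ne
            exact fun (he : q = p) => hpq he.symm
        | some i =>
            simp only [Option.map_some]
            congr 1
            push_cast
            ring

theorem pvBridge_idx (q : Int × Int) :
    pvIdxDict.get? q = (pvFind q pvPSLit).map (fun n => ((n : Nat) : Int)) := by
  unfold pvIdxDict
  rw [pvFO_lit, pvDictFold_get? q pvPSLit 0 PySem.Dict.empty pvPS_nodup]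
  cases hf : pvFind q pvPSLit with
  | none => simp [PySem.Dict.get?_empty]
  | some i => simp
theorem pvBridge_cell : ∀ r : Nat, r < 21 → ∀ c : Nat, c < 21 →
    tmplCell (((r : Nat) : Int)) (((c : Nat) : Int)) = pvRead pvTemplate (((r : Nat) : Int)) (((c : Nat) : Int)) := by
  decide

-- padding: A's foldl-of-appends is payload ++ flatMap of the alternating blocks
theorem pvPad_eq (p : List Int) : appendToWhiteSpace p = padPayload p := by
  unfold appendToWhiteSpace padPayload
  have hf : (fun (acc : List Int) (i : Int) =>
      if PySem.Int.mod i 2 = 0 then acc ++ [1, 1, 1, 0, 1, 1, 0, 0]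
      else acc ++ [0, 0, 0, 1, 0, 0, 0, 1]) =
      (fun (acc : List Int) (i : Int) =>
        acc ++ (if PySem.Int.mod i 2 = 0 then [1, 1, 1, 0, 1, 1, 0, 0] else [0, 0, 0, 1, 0, 0, 0, 1])) := by
    funext acc i
    split <;> rfl
  rw [hf, PySem.List.foldl_append_eq_flatMap]

-- A's output as the pvFB-fold over the chunked position list (the old scan-and-fill reduction)
-- columns < L still read like the template
def pvInv (g : List (List Int)) (L : Int) : Prop :=
  ∀ row col : Int, 0 ≤ row → row < 21 → 0 ≤ col → col < L → pvRead g row col = pvRead pvTemplate row col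

theorem pvInv_mono {g : List (List Int)} {L L' : Int} (h : L ≤ L') (hi : pvInv g L') : pvInv g L :=
  fun row col h1 h2 h3 h4 => hi row col h1 h2 h3 (by omega)

theorem pvReads_foldl (ps : List (Int × Int)) : ∀ (st : (List (List Int)) × List Int),
    pvShape st.1 → (∀ p ∈ ps, 0 ≤ p.1 ∧ p.1 < 21 ∧ 0 ≤ p.2 ∧ p.2 < 21) →
    ∀ row col : Int, 0 ≤ row → row < 21 → 0 ≤ col → col < 21 → (∀ p ∈ ps, p.2 ≠ col) →
    pvRead (List.foldl pvFB st ps).1 row col = pvRead st.1 row col := by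
  induction ps with
  | nil => intro st _ _ row col _ _ _ _ _; rfl
  | cons p ps ih =>
      intro st hs hb row col h0 h1 h2 h3 hne
      rw [List.foldl_cons]
      obtain ⟨hp1, hp2, hp3, hp4⟩ := hb p (List.mem_cons_self)
      rw [ih _ (pvShape_pvFB st p.1 p.2 hs hp1 hp2)
            (fun q hq => hb q (List.mem_cons_of_mem _ hq)) row col h0 h1 h2 h3
            (fun q hq => hne q (List.mem_cons_of_mem _ hq))]
      exact pvRead_pvFB_ne st p.1 p.2 row col hs hp1 hp2 hp3 hp4 h0 h1 h2 h3
        (Or.inr (fun hcc => hne p (List.mem_cons_self) (hcc ▸ rfl)))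

theorem pvInv_step (st : (List (List Int)) × List Int) (ps : List (Int × Int)) (L : Int)
    (hs : pvShape st.1) (hL : L ≤ 21)
    (hb : ∀ p ∈ ps, 0 ≤ p.1 ∧ p.1 < 21 ∧ 0 ≤ p.2 ∧ p.2 < 21)
    (hcols : ∀ p ∈ ps, L ≤ p.2)
    (hi : pvInv st.1 L) : pvInv (List.foldl pvFB st ps).1 L := by
  intro row col h0 h1 h2 h3
  rw [pvReads_foldl ps st hs hb row col h0 h1 h2 (by omega)
        (fun p hp => by have := hcols p hp; omega)]
  exact hi row col h0 h1 h2 h3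

theorem pvPairStep (st : (List (List Int)) × List Int) (row zl zr : Int)
    (h : pvRead st.1 row zl + pvRead st.1 row zr = 4) :
    pvFARow zl zr st row = pvFB (pvFB st (row, zr)) (row, zl) := by
  simp only [pvRead] at h
  simp only [pvFARow]
  rw [if_pos h]
  rfl

theorem pvSkipStep (st : (List (List Int)) × List Int) (row zl zr : Int)
    (h : pvRead st.1 row zl + pvRead st.1 row zr ≠ 4) :
    pvFARow zl zr st row = st := by
  simp only [pvRead] at h
  simp only [pvFARow]
  rw [if_neg h]

theorem pvInner (zl zr : Int) (hzl0 : 0 ≤ zl) (hzl1 : zl < 21) (hzr0 : 0 ≤ zr) (hzr1 : zr < 21) :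
    ∀ (rows : List Int) (st : (List (List Int)) × List Int),
    pvShape st.1 →
    (∀ r ∈ rows, 0 ≤ r ∧ r < 21) → rows.Pairwise (· ≠ ·) →
    (∀ r ∈ rows, pvRead st.1 r zl = pvRead pvTemplate r zl ∧
                 pvRead st.1 r zr = pvRead pvTemplate r zr) →
    List.foldl (pvFARow zl zr) st rows = List.foldl pvFB st (pvChunkOf zl zr rows) := by
  intro rows
  induction rows with
  | nil => intro st _ _ _ _; rfl
  | cons row rows ih =>
      intro st hs hb hp hreads
      obtain ⟨hr0, hr1⟩ := hb row (List.mem_cons_self)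
      obtain ⟨hel, her⟩ := hreads row (List.mem_cons_self)
      have hpt := (List.pairwise_cons.mp hp).1
      have hbt := fun r hr => hb r (List.mem_cons_of_mem _ hr)
      have hrt := fun r hr => hreads r (List.mem_cons_of_mem _ hr)
      rw [List.foldl_cons, pvChunkOf]
      by_cases hc : pvRead pvTemplate row zl + pvRead pvTemplate row zr = 4
      · rw [if_pos hc]
        rw [pvPairStep st row zl zr (by rw [hel, her]; exact hc)]
        simp only [List.cons_append, List.nil_append, List.foldl_cons]
        have hs1 := pvShape_pvFB st row zr hs hr0 hr1
        have hs2 := pvShape_pvFB (pvFB st (row, zr)) row zl hs1 hr0 hr1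
        refine ih _ hs2 hbt (List.pairwise_cons.mp hp).2 ?_
        intro r hr
        have hner : r ≠ row := fun he => (hpt r hr) he.symm
        obtain ⟨hq0, hq1⟩ := hbt r hr
        constructor
        · rw [pvRead_pvFB_ne _ row zl r zl hs1 hr0 hr1 hzl0 hzl1 hq0 hq1 hzl0 hzl1 (Or.inl hner),
              pvRead_pvFB_ne _ row zr r zl hs hr0 hr1 hzr0 hzr1 hq0 hq1 hzl0 hzl1 (Or.inl hner)]
          exact (hrt r hr).1
        · rw [pvRead_pvFB_ne _ row zl r zr hs1 hr0 hr1 hzl0 hzl1 hq0 hq1 hzr0 hzr1 (Or.inl hner),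
              pvRead_pvFB_ne _ row zr r zr hs hr0 hr1 hzr0 hzr1 hq0 hq1 hzr0 hzr1 (Or.inl hner)]
          exact (hrt r hr).2
      · rw [if_neg hc]
        rw [pvSkipStep st row zl zr (by rw [hel, her]; exact hc)]
        rw [List.nil_append]
        exact ih st hs hbt (List.pairwise_cons.mp hp).2 hrt

theorem pvRowsU_bound : ∀ r ∈ pvRowsU, 0 ≤ r ∧ r < 21 := by decide
theorem pvRowsD_bound : ∀ r ∈ pvRowsD, 0 ≤ r ∧ r < 21 := by decide

theorem pvCol10 (st : (List (List Int)) × List Int) (hs : pvShape st.1)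
    (h : ∀ r ∈ pvRowsD, pvRead st.1 r 19 = pvRead pvTemplate r 19 ∧
                        pvRead st.1 r 20 = pvRead pvTemplate r 20) :
    pvFA st 10 = List.foldl pvFB st (pvChunkOf 19 20 pvRowsD) := by
  have e : pvFA st 10 = List.foldl (pvFARow 19 20) st pvRowsD := rfl
  rw [e]
  exact pvInner 19 20 (by norm_num) (by norm_num) (by norm_num) (by norm_num)
    pvRowsD st hs pvRowsD_bound (by decide) h

theorem pvCol9 (st : (List (List Int)) × List Int) (hs : pvShape st.1)
    (h : ∀ r ∈ pvRowsU, pvRead st.1 r 17 = pvRead pvTemplate r 17 ∧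
                        pvRead st.1 r 18 = pvRead pvTemplate r 18) :
    pvFA st 9 = List.foldl pvFB st (pvChunkOf 17 18 pvRowsU) := by
  have e : pvFA st 9 = List.foldl (pvFARow 17 18) st pvRowsU := rfl
  rw [e]
  exact pvInner 17 18 (by norm_num) (by norm_num) (by norm_num) (by norm_num)
    pvRowsU st hs pvRowsU_bound (by decide) h

theorem pvCol8 (st : (List (List Int)) × List Int) (hs : pvShape st.1)
    (h : ∀ r ∈ pvRowsD, pvRead st.1 r 15 = pvRead pvTemplate r 15 ∧
                        pvRead st.1 r 16 = pvRead pvTemplate r 16) :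
    pvFA st 8 = List.foldl pvFB st (pvChunkOf 15 16 pvRowsD) := by
  have e : pvFA st 8 = List.foldl (pvFARow 15 16) st pvRowsD := rfl
  rw [e]
  exact pvInner 15 16 (by norm_num) (by norm_num) (by norm_num) (by norm_num)
    pvRowsD st hs pvRowsD_bound (by decide) h

theorem pvCol7 (st : (List (List Int)) × List Int) (hs : pvShape st.1)
    (h : ∀ r ∈ pvRowsU, pvRead st.1 r 13 = pvRead pvTemplate r 13 ∧
                        pvRead st.1 r 14 = pvRead pvTemplate r 14) :
    pvFA st 7 = List.foldl pvFB st (pvChunkOf 13 14 pvRowsU) := by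
  have e : pvFA st 7 = List.foldl (pvFARow 13 14) st pvRowsU := rfl
  rw [e]
  exact pvInner 13 14 (by norm_num) (by norm_num) (by norm_num) (by norm_num)
    pvRowsU st hs pvRowsU_bound (by decide) h

theorem pvCol6 (st : (List (List Int)) × List Int) (hs : pvShape st.1)
    (h : ∀ r ∈ pvRowsD, pvRead st.1 r 11 = pvRead pvTemplate r 11 ∧
                        pvRead st.1 r 12 = pvRead pvTemplate r 12) :
    pvFA st 6 = List.foldl pvFB st (pvChunkOf 11 12 pvRowsD) := by
  have e : pvFA st 6 = List.foldl (pvFARow 11 12) st pvRowsD := rfl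
  rw [e]
  exact pvInner 11 12 (by norm_num) (by norm_num) (by norm_num) (by norm_num)
    pvRowsD st hs pvRowsD_bound (by decide) h

theorem pvCol5 (st : (List (List Int)) × List Int) (hs : pvShape st.1)
    (h : ∀ r ∈ pvRowsU, pvRead st.1 r 9 = pvRead pvTemplate r 9 ∧
                        pvRead st.1 r 10 = pvRead pvTemplate r 10) :
    pvFA st 5 = List.foldl pvFB st (pvChunkOf 9 10 pvRowsU) := by
  have e : pvFA st 5 = List.foldl (pvFARow 9 10) st pvRowsU := rfl
  rw [e]
  exact pvInner 9 10 (by norm_num) (by norm_num) (by norm_num) (by norm_num)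
    pvRowsU st hs pvRowsU_bound (by decide) h

theorem pvCol4 (st : (List (List Int)) × List Int) (hs : pvShape st.1)
    (h : ∀ r ∈ pvRowsD, pvRead st.1 r 7 = pvRead pvTemplate r 7 ∧
                        pvRead st.1 r 8 = pvRead pvTemplate r 8) :
    pvFA st 4 = List.foldl pvFB st (pvChunkOf 7 8 pvRowsD) := by
  have e : pvFA st 4 = List.foldl (pvFARow 7 8) st pvRowsD := rfl
  rw [e]
  exact pvInner 7 8 (by norm_num) (by norm_num) (by norm_num) (by norm_num)
    pvRowsD st hs pvRowsD_bound (by decide) h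

theorem pvCol3 (st : (List (List Int)) × List Int) (hs : pvShape st.1)
    (h : ∀ r ∈ pvRowsU, pvRead st.1 r 4 = pvRead pvTemplate r 4 ∧
                        pvRead st.1 r 5 = pvRead pvTemplate r 5) :
    pvFA st 3 = List.foldl pvFB st (pvChunkOf 4 5 pvRowsU) := by
  have e : pvFA st 3 = List.foldl (pvFARow 4 5) st pvRowsU := rfl
  rw [e]
  exact pvInner 4 5 (by norm_num) (by norm_num) (by norm_num) (by norm_num)
    pvRowsU st hs pvRowsU_bound (by decide) h

theorem pvCol2 (st : (List (List Int)) × List Int) (hs : pvShape st.1)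
    (h : ∀ r ∈ pvRowsD, pvRead st.1 r 2 = pvRead pvTemplate r 2 ∧
                        pvRead st.1 r 3 = pvRead pvTemplate r 3) :
    pvFA st 2 = List.foldl pvFB st (pvChunkOf 2 3 pvRowsD) := by
  have e : pvFA st 2 = List.foldl (pvFARow 2 3) st pvRowsD := rfl
  rw [e]
  exact pvInner 2 3 (by norm_num) (by norm_num) (by norm_num) (by norm_num)
    pvRowsD st hs pvRowsD_bound (by decide) h

theorem pvCol1 (st : (List (List Int)) × List Int) (hs : pvShape st.1)
    (h : ∀ r ∈ pvRowsU, pvRead st.1 r 0 = pvRead pvTemplate r 0 ∧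
                        pvRead st.1 r 1 = pvRead pvTemplate r 1) :
    pvFA st 1 = List.foldl pvFB st (pvChunkOf 0 1 pvRowsU) := by
  have e : pvFA st 1 = List.foldl (pvFARow 0 1) st pvRowsU := rfl
  rw [e]
  exact pvInner 0 1 (by norm_num) (by norm_num) (by norm_num) (by norm_num)
    pvRowsU st hs pvRowsU_bound (by decide) h

theorem pvAB (bs : List Int) :
    List.foldl pvFA (pvTemplate, bs) [10, 9, 8, 7, 6, 5, 4, 3, 2, 1] =
    List.foldl pvFB (pvTemplate, bs) (pvChunkOf 19 20 pvRowsD ++ (pvChunkOf 17 18 pvRowsU ++ (pvChunkOf 15 16 pvRowsD ++ (pvChunkOf 13 14 pvRowsU ++ (pvChunkOf 11 12 pvRowsD ++ (pvChunkOf 9 10 pvRowsU ++ (pvChunkOf 7 8 pvRowsD ++ (pvChunkOf 4 5 pvRowsU ++ (pvChunkOf 2 3 pvRowsD ++ (pvChunkOf 0 1 pvRowsU)))))))))) := by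
  simp only [List.foldl_cons, List.foldl_nil, List.foldl_append]
  have hs0 : pvShape (pvTemplate, bs).1 := pvShape_template
  have hi0 : pvInv (pvTemplate, bs).1 21 := fun _ _ _ _ _ _ => rfl
  have h1 : ∀ q ∈ pvRowsD, pvRead ((pvTemplate, bs)).1 q 19 = pvRead pvTemplate q 19 ∧
      pvRead ((pvTemplate, bs)).1 q 20 = pvRead pvTemplate q 20 := fun q hq =>
    ⟨hi0 q 19 (pvRowsD_bound q hq).1 (pvRowsD_bound q hq).2 (by norm_num) (by norm_num),
     hi0 q 20 (pvRowsD_bound q hq).1 (pvRowsD_bound q hq).2 (by norm_num) (by norm_num)⟩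
  rw [pvCol10 ((pvTemplate, bs)) hs0 h1]
  have hs1 : pvShape (List.foldl pvFB ((pvTemplate, bs)) (pvChunkOf 19 20 pvRowsD)).1 :=
    pvShape_foldl (pvChunkOf 19 20 pvRowsD) ((pvTemplate, bs)) hs0 (by decide)
  have hi1 : pvInv (List.foldl pvFB ((pvTemplate, bs)) (pvChunkOf 19 20 pvRowsD)).1 19 :=
    pvInv_step ((pvTemplate, bs)) (pvChunkOf 19 20 pvRowsD) 19 hs0 (by norm_num) (by decide) (by decide)
      (pvInv_mono (by norm_num) hi0)
  have h2 : ∀ q ∈ pvRowsU, pvRead (List.foldl pvFB ((pvTemplate, bs)) (pvChunkOf 19 20 pvRowsD)).1 q 17 = pvRead pvTemplate q 17 ∧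
      pvRead (List.foldl pvFB ((pvTemplate, bs)) (pvChunkOf 19 20 pvRowsD)).1 q 18 = pvRead pvTemplate q 18 := fun q hq =>
    ⟨hi1 q 17 (pvRowsU_bound q hq).1 (pvRowsU_bound q hq).2 (by norm_num) (by norm_num),
     hi1 q 18 (pvRowsU_bound q hq).1 (pvRowsU_bound q hq).2 (by norm_num) (by norm_num)⟩
  rw [pvCol9 (List.foldl pvFB ((pvTemplate, bs)) (pvChunkOf 19 20 pvRowsD)) hs1 h2]
  have hs2 : pvShape (List.foldl pvFB (List.foldl pvFB ((pvTemplate, bs)) (pvChunkOf 19 20 pvRowsD)) (pvChunkOf 17 18 pvRowsU)).1 :=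
    pvShape_foldl (pvChunkOf 17 18 pvRowsU) (List.foldl pvFB ((pvTemplate, bs)) (pvChunkOf 19 20 pvRowsD)) hs1 (by decide)
  have hi2 : pvInv (List.foldl pvFB (List.foldl pvFB ((pvTemplate, bs)) (pvChunkOf 19 20 pvRowsD)) (pvChunkOf 17 18 pvRowsU)).1 17 :=
    pvInv_step (List.foldl pvFB ((pvTemplate, bs)) (pvChunkOf 19 20 pvRowsD)) (pvChunkOf 17 18 pvRowsU) 17 hs1 (by norm_num) (by decide) (by decide)
      (pvInv_mono (by norm_num) hi1)
  have h3 : ∀ q ∈ pvRowsD, pvRead (List.foldl pvFB (List.foldl pvFB ((pvTemplate, bs)) (pvChunkOf 19 20 pvRowsD)) (pvChunkOf 17 18 pvRowsU)).1 q 15 = pvRead pvTemplate q 15 ∧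
      pvRead (List.foldl pvFB (List.foldl pvFB ((pvTemplate, bs)) (pvChunkOf 19 20 pvRowsD)) (pvChunkOf 17 18 pvRowsU)).1 q 16 = pvRead pvTemplate q 16 := fun q hq =>
    ⟨hi2 q 15 (pvRowsD_bound q hq).1 (pvRowsD_bound q hq).2 (by norm_num) (by norm_num),
     hi2 q 16 (pvRowsD_bound q hq).1 (pvRowsD_bound q hq).2 (by norm_num) (by norm_num)⟩
  rw [pvCol8 (List.foldl pvFB (List.foldl pvFB ((pvTemplate, bs)) (pvChunkOf 19 20 pvRowsD)) (pvChunkOf 17 18 pvRowsU)) hs2 h3]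
  have hs3 : pvShape (List.foldl pvFB (List.foldl pvFB (List.foldl pvFB ((pvTemplate, bs)) (pvChunkOf 19 20 pvRowsD)) (pvChunkOf 17 18 pvRowsU)) (pvChunkOf 15 16 pvRowsD)).1 :=
    pvShape_foldl (pvChunkOf 15 16 pvRowsD) (List.foldl pvFB (List.foldl pvFB ((pvTemplate, bs)) (pvChunkOf 19 20 pvRowsD)) (pvChunkOf 17 18 pvRowsU)) hs2 (by decide)
  have hi3 : pvInv (List.foldl pvFB (List.foldl pvFB (List.foldl pvFB ((pvTemplate, bs)) (pvChunkOf 19 20 pvRowsD)) (pvChunkOf 17 18 pvRowsU)) (pvChunkOf 15 16 pvRowsD)).1 15 :=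
    pvInv_step (List.foldl pvFB (List.foldl pvFB ((pvTemplate, bs)) (pvChunkOf 19 20 pvRowsD)) (pvChunkOf 17 18 pvRowsU)) (pvChunkOf 15 16 pvRowsD) 15 hs2 (by norm_num) (by decide) (by decide)
      (pvInv_mono (by norm_num) hi2)
  have h4 : ∀ q ∈ pvRowsU, pvRead (List.foldl pvFB (List.foldl pvFB (List.foldl pvFB ((pvTemplate, bs)) (pvChunkOf 19 20 pvRowsD)) (pvChunkOf 17 18 pvRowsU)) (pvChunkOf 15 16 pvRowsD)).1 q 13 = pvRead pvTemplate q 13 ∧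
      pvRead (List.foldl pvFB (List.foldl pvFB (List.foldl pvFB ((pvTemplate, bs)) (pvChunkOf 19 20 pvRowsD)) (pvChunkOf 17 18 pvRowsU)) (pvChunkOf 15 16 pvRowsD)).1 q 14 = pvRead pvTemplate q 14 := fun q hq =>
    ⟨hi3 q 13 (pvRowsU_bound q hq).1 (pvRowsU_bound q hq).2 (by norm_num) (by norm_num),
     hi3 q 14 (pvRowsU_bound q hq).1 (pvRowsU_bound q hq).2 (by norm_num) (by norm_num)⟩
  rw [pvCol7 (List.foldl pvFB (List.foldl pvFB (List.foldl pvFB ((pvTemplate, bs)) (pvChunkOf 19 20 pvRowsD)) (pvChunkOf 17 18 pvRowsU)) (pvChunkOf 15 16 pvRowsD)) hs3 h4]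
  have hs4 : pvShape (List.foldl pvFB (List.foldl pvFB (List.foldl pvFB (List.foldl pvFB ((pvTemplate, bs)) (pvChunkOf 19 20 pvRowsD)) (pvChunkOf 17 18 pvRowsU)) (pvChunkOf 15 16 pvRowsD)) (pvChunkOf 13 14 pvRowsU)).1 :=
    pvShape_foldl (pvChunkOf 13 14 pvRowsU) (List.foldl pvFB (List.foldl pvFB (List.foldl pvFB ((pvTemplate, bs)) (pvChunkOf 19 20 pvRowsD)) (pvChunkOf 17 18 pvRowsU)) (pvChunkOf 15 16 pvRowsD)) hs3 (by decide)
  have hi4 : pvInv (List.foldl pvFB (List.foldl pvFB (List.foldl pvFB (List.foldl pvFB ((pvTemplate, bs)) (pvChunkOf 19 20 pvRowsD)) (pvChunkOf 17 18 pvRowsU)) (pvChunkOf 15 16 pvRowsD)) (pvChunkOf 13 14 pvRowsU)).1 13 :=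
    pvInv_step (List.foldl pvFB (List.foldl pvFB (List.foldl pvFB ((pvTemplate, bs)) (pvChunkOf 19 20 pvRowsD)) (pvChunkOf 17 18 pvRowsU)) (pvChunkOf 15 16 pvRowsD)) (pvChunkOf 13 14 pvRowsU) 13 hs3 (by norm_num) (by decide) (by decide)
      (pvInv_mono (by norm_num) hi3)
  have h5 : ∀ q ∈ pvRowsD, pvRead (List.foldl pvFB (List.foldl pvFB (List.foldl pvFB (List.foldl pvFB ((pvTemplate, bs)) (pvChunkOf 19 20 pvRowsD)) (pvChunkOf 17 18 pvRowsU)) (pvChunkOf 15 16 pvRowsD)) (pvChunkOf 13 14 pvRowsU)).1 q 11 = pvRead pvTemplate q 11 ∧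
      pvRead (List.foldl pvFB (List.foldl pvFB (List.foldl pvFB (List.foldl pvFB ((pvTemplate, bs)) (pvChunkOf 19 20 pvRowsD)) (pvChunkOf 17 18 pvRowsU)) (pvChunkOf 15 16 pvRowsD)) (pvChunkOf 13 14 pvRowsU)).1 q 12 = pvRead pvTemplate q 12 := fun q hq =>
    ⟨hi4 q 11 (pvRowsD_bound q hq).1 (pvRowsD_bound q hq).2 (by norm_num) (by norm_num),
     hi4 q 12 (pvRowsD_bound q hq).1 (pvRowsD_bound q hq).2 (by norm_num) (by norm_num)⟩
  rw [pvCol6 (List.foldl pvFB (List.foldl pvFB (List.foldl pvFB (List.foldl pvFB ((pvTemplate, bs)) (pvChunkOf 19 20 pvRowsD)) (pvChunkOf 17 18 pvRowsU)) (pvChunkOf 15 16 pvRowsD)) (pvChunkOf 13 14 pvRowsU)) hs4 h5]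
  have hs5 : pvShape (List.foldl pvFB (List.foldl pvFB (List.foldl pvFB (List.foldl pvFB (List.foldl pvFB ((pvTemplate, bs)) (pvChunkOf 19 20 pvRowsD)) (pvChunkOf 17 18 pvRowsU)) (pvChunkOf 15 16 pvRowsD)) (pvChunkOf 13 14 pvRowsU)) (pvChunkOf 11 12 pvRowsD)).1 :=
    pvShape_foldl (pvChunkOf 11 12 pvRowsD) (List.foldl pvFB (List.foldl pvFB (List.foldl pvFB (List.foldl pvFB ((pvTemplate, bs)) (pvChunkOf 19 20 pvRowsD)) (pvChunkOf 17 18 pvRowsU)) (pvChunkOf 15 16 pvRowsD)) (pvChunkOf 13 14 pvRowsU)) hs4 (by decide)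
  have hi5 : pvInv (List.foldl pvFB (List.foldl pvFB (List.foldl pvFB (List.foldl pvFB (List.foldl pvFB ((pvTemplate, bs)) (pvChunkOf 19 20 pvRowsD)) (pvChunkOf 17 18 pvRowsU)) (pvChunkOf 15 16 pvRowsD)) (pvChunkOf 13 14 pvRowsU)) (pvChunkOf 11 12 pvRowsD)).1 11 :=
    pvInv_step (List.foldl pvFB (List.foldl pvFB (List.foldl pvFB (List.foldl pvFB ((pvTemplate, bs)) (pvChunkOf 19 20 pvRowsD)) (pvChunkOf 17 18 pvRowsU)) (pvChunkOf 15 16 pvRowsD)) (pvChunkOf 13 14 pvRowsU)) (pvChunkOf 11 12 pvRowsD) 11 hs4 (by norm_num) (by decide) (by decide)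
      (pvInv_mono (by norm_num) hi4)
  have h6 : ∀ q ∈ pvRowsU, pvRead (List.foldl pvFB (List.foldl pvFB (List.foldl pvFB (List.foldl pvFB (List.foldl pvFB ((pvTemplate, bs)) (pvChunkOf 19 20 pvRowsD)) (pvChunkOf 17 18 pvRowsU)) (pvChunkOf 15 16 pvRowsD)) (pvChunkOf 13 14 pvRowsU)) (pvChunkOf 11 12 pvRowsD)).1 q 9 = pvRead pvTemplate q 9 ∧
      pvRead (List.foldl pvFB (List.foldl pvFB (List.foldl pvFB (List.foldl pvFB (List.foldl pvFB ((pvTemplate, bs)) (pvChunkOf 19 20 pvRowsD)) (pvChunkOf 17 18 pvRowsU)) (pvChunkOf 15 16 pvRowsD)) (pvChunkOf 13 14 pvRowsU)) (pvChunkOf 11 12 pvRowsD)).1 q 10 = pvRead pvTemplate q 10 := fun q hq =>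
    ⟨hi5 q 9 (pvRowsU_bound q hq).1 (pvRowsU_bound q hq).2 (by norm_num) (by norm_num),
     hi5 q 10 (pvRowsU_bound q hq).1 (pvRowsU_bound q hq).2 (by norm_num) (by norm_num)⟩
  rw [pvCol5 (List.foldl pvFB (List.foldl pvFB (List.foldl pvFB (List.foldl pvFB (List.foldl pvFB ((pvTemplate, bs)) (pvChunkOf 19 20 pvRowsD)) (pvChunkOf 17 18 pvRowsU)) (pvChunkOf 15 16 pvRowsD)) (pvChunkOf 13 14 pvRowsU)) (pvChunkOf 11 12 pvRowsD)) hs5 h6]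
  have hs6 : pvShape (List.foldl pvFB (List.foldl pvFB (List.foldl pvFB (List.foldl pvFB (List.foldl pvFB (List.foldl pvFB ((pvTemplate, bs)) (pvChunkOf 19 20 pvRowsD)) (pvChunkOf 17 18 pvRowsU)) (pvChunkOf 15 16 pvRowsD)) (pvChunkOf 13 14 pvRowsU)) (pvChunkOf 11 12 pvRowsD)) (pvChunkOf 9 10 pvRowsU)).1 :=
    pvShape_foldl (pvChunkOf 9 10 pvRowsU) (List.foldl pvFB (List.foldl pvFB (List.foldl pvFB (List.foldl pvFB (List.foldl pvFB ((pvTemplate, bs)) (pvChunkOf 19 20 pvRowsD)) (pvChunkOf 17 18 pvRowsU)) (pvChunkOf 15 16 pvRowsD)) (pvChunkOf 13 14 pvRowsU)) (pvChunkOf 11 12 pvRowsD)) hs5 (by decide)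
  have hi6 : pvInv (List.foldl pvFB (List.foldl pvFB (List.foldl pvFB (List.foldl pvFB (List.foldl pvFB (List.foldl pvFB ((pvTemplate, bs)) (pvChunkOf 19 20 pvRowsD)) (pvChunkOf 17 18 pvRowsU)) (pvChunkOf 15 16 pvRowsD)) (pvChunkOf 13 14 pvRowsU)) (pvChunkOf 11 12 pvRowsD)) (pvChunkOf 9 10 pvRowsU)).1 9 :=
    pvInv_step (List.foldl pvFB (List.foldl pvFB (List.foldl pvFB (List.foldl pvFB (List.foldl pvFB ((pvTemplate, bs)) (pvChunkOf 19 20 pvRowsD)) (pvChunkOf 17 18 pvRowsU)) (pvChunkOf 15 16 pvRowsD)) (pvChunkOf 13 14 pvRowsU)) (pvChunkOf 11 12 pvRowsD)) (pvChunkOf 9 10 pvRowsU) 9 hs5 (by norm_num) (by decide) (by decide)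
      (pvInv_mono (by norm_num) hi5)
  have h7 : ∀ q ∈ pvRowsD, pvRead (List.foldl pvFB (List.foldl pvFB (List.foldl pvFB (List.foldl pvFB (List.foldl pvFB (List.foldl pvFB ((pvTemplate, bs)) (pvChunkOf 19 20 pvRowsD)) (pvChunkOf 17 18 pvRowsU)) (pvChunkOf 15 16 pvRowsD)) (pvChunkOf 13 14 pvRowsU)) (pvChunkOf 11 12 pvRowsD)) (pvChunkOf 9 10 pvRowsU)).1 q 7 = pvRead pvTemplate q 7 ∧
      pvRead (List.foldl pvFB (List.foldl pvFB (List.foldl pvFB (List.foldl pvFB (List.foldl pvFB (List.foldl pvFB ((pvTemplate, bs)) (pvChunkOf 19 20 pvRowsD)) (pvChunkOf 17 18 pvRowsU)) (pvChunkOf 15 16 pvRowsD)) (pvChunkOf 13 14 pvRowsU)) (pvChunkOf 11 12 pvRowsD)) (pvChunkOf 9 10 pvRowsU)).1 q 8 = pvRead pvTemplate q 8 := fun q hq =>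
    ⟨hi6 q 7 (pvRowsD_bound q hq).1 (pvRowsD_bound q hq).2 (by norm_num) (by norm_num),
     hi6 q 8 (pvRowsD_bound q hq).1 (pvRowsD_bound q hq).2 (by norm_num) (by norm_num)⟩
  rw [pvCol4 (List.foldl pvFB (List.foldl pvFB (List.foldl pvFB (List.foldl pvFB (List.foldl pvFB (List.foldl pvFB ((pvTemplate, bs)) (pvChunkOf 19 20 pvRowsD)) (pvChunkOf 17 18 pvRowsU)) (pvChunkOf 15 16 pvRowsD)) (pvChunkOf 13 14 pvRowsU)) (pvChunkOf 11 12 pvRowsD)) (pvChunkOf 9 10 pvRowsU)) hs6 h7]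
  have hs7 : pvShape (List.foldl pvFB (List.foldl pvFB (List.foldl pvFB (List.foldl pvFB (List.foldl pvFB (List.foldl pvFB (List.foldl pvFB ((pvTemplate, bs)) (pvChunkOf 19 20 pvRowsD)) (pvChunkOf 17 18 pvRowsU)) (pvChunkOf 15 16 pvRowsD)) (pvChunkOf 13 14 pvRowsU)) (pvChunkOf 11 12 pvRowsD)) (pvChunkOf 9 10 pvRowsU)) (pvChunkOf 7 8 pvRowsD)).1 :=
    pvShape_foldl (pvChunkOf 7 8 pvRowsD) (List.foldl pvFB (List.foldl pvFB (List.foldl pvFB (List.foldl pvFB (List.foldl pvFB (List.foldl pvFB ((pvTemplate, bs)) (pvChunkOf 19 20 pvRowsD)) (pvChunkOf 17 18 pvRowsU)) (pvChunkOf 15 16 pvRowsD)) (pvChunkOf 13 14 pvRowsU)) (pvChunkOf 11 12 pvRowsD)) (pvChunkOf 9 10 pvRowsU)) hs6 (by decide)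
  have hi7 : pvInv (List.foldl pvFB (List.foldl pvFB (List.foldl pvFB (List.foldl pvFB (List.foldl pvFB (List.foldl pvFB (List.foldl pvFB ((pvTemplate, bs)) (pvChunkOf 19 20 pvRowsD)) (pvChunkOf 17 18 pvRowsU)) (pvChunkOf 15 16 pvRowsD)) (pvChunkOf 13 14 pvRowsU)) (pvChunkOf 11 12 pvRowsD)) (pvChunkOf 9 10 pvRowsU)) (pvChunkOf 7 8 pvRowsD)).1 7 :=
    pvInv_step (List.foldl pvFB (List.foldl pvFB (List.foldl pvFB (List.foldl pvFB (List.foldl pvFB (List.foldl pvFB ((pvTemplate, bs)) (pvChunkOf 19 20 pvRowsD)) (pvChunkOf 17 18 pvRowsU)) (pvChunkOf 15 16 pvRowsD)) (pvChunkOf 13 14 pvRowsU)) (pvChunkOf 11 12 pvRowsD)) (pvChunkOf 9 10 pvRowsU)) (pvChunkOf 7 8 pvRowsD) 7 hs6 (by norm_num) (by decide) (by decide)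
      (pvInv_mono (by norm_num) hi6)
  have h8 : ∀ q ∈ pvRowsU, pvRead (List.foldl pvFB (List.foldl pvFB (List.foldl pvFB (List.foldl pvFB (List.foldl pvFB (List.foldl pvFB (List.foldl pvFB ((pvTemplate, bs)) (pvChunkOf 19 20 pvRowsD)) (pvChunkOf 17 18 pvRowsU)) (pvChunkOf 15 16 pvRowsD)) (pvChunkOf 13 14 pvRowsU)) (pvChunkOf 11 12 pvRowsD)) (pvChunkOf 9 10 pvRowsU)) (pvChunkOf 7 8 pvRowsD)).1 q 4 = pvRead pvTemplate q 4 ∧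
      pvRead (List.foldl pvFB (List.foldl pvFB (List.foldl pvFB (List.foldl pvFB (List.foldl pvFB (List.foldl pvFB (List.foldl pvFB ((pvTemplate, bs)) (pvChunkOf 19 20 pvRowsD)) (pvChunkOf 17 18 pvRowsU)) (pvChunkOf 15 16 pvRowsD)) (pvChunkOf 13 14 pvRowsU)) (pvChunkOf 11 12 pvRowsD)) (pvChunkOf 9 10 pvRowsU)) (pvChunkOf 7 8 pvRowsD)).1 q 5 = pvRead pvTemplate q 5 := fun q hq =>
    ⟨hi7 q 4 (pvRowsU_bound q hq).1 (pvRowsU_bound q hq).2 (by norm_num) (by norm_num),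
     hi7 q 5 (pvRowsU_bound q hq).1 (pvRowsU_bound q hq).2 (by norm_num) (by norm_num)⟩
  rw [pvCol3 (List.foldl pvFB (List.foldl pvFB (List.foldl pvFB (List.foldl pvFB (List.foldl pvFB (List.foldl pvFB (List.foldl pvFB ((pvTemplate, bs)) (pvChunkOf 19 20 pvRowsD)) (pvChunkOf 17 18 pvRowsU)) (pvChunkOf 15 16 pvRowsD)) (pvChunkOf 13 14 pvRowsU)) (pvChunkOf 11 12 pvRowsD)) (pvChunkOf 9 10 pvRowsU)) (pvChunkOf 7 8 pvRowsD)) hs7 h8]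
  have hs8 : pvShape (List.foldl pvFB (List.foldl pvFB (List.foldl pvFB (List.foldl pvFB (List.foldl pvFB (List.foldl pvFB (List.foldl pvFB (List.foldl pvFB ((pvTemplate, bs)) (pvChunkOf 19 20 pvRowsD)) (pvChunkOf 17 18 pvRowsU)) (pvChunkOf 15 16 pvRowsD)) (pvChunkOf 13 14 pvRowsU)) (pvChunkOf 11 12 pvRowsD)) (pvChunkOf 9 10 pvRowsU)) (pvChunkOf 7 8 pvRowsD)) (pvChunkOf 4 5 pvRowsU)).1 :=
    pvShape_foldl (pvChunkOf 4 5 pvRowsU) (List.foldl pvFB (List.foldl pvFB (List.foldl pvFB (List.foldl pvFB (List.foldl pvFB (List.foldl pvFB (List.foldl pvFB ((pvTemplate, bs)) (pvChunkOf 19 20 pvRowsD)) (pvChunkOf 17 18 pvRowsU)) (pvChunkOf 15 16 pvRowsD)) (pvChunkOf 13 14 pvRowsU)) (pvChunkOf 11 12 pvRowsD)) (pvChunkOf 9 10 pvRowsU)) (pvChunkOf 7 8 pvRowsD)) hs7 (by decide)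
  have hi8 : pvInv (List.foldl pvFB (List.foldl pvFB (List.foldl pvFB (List.foldl pvFB (List.foldl pvFB (List.foldl pvFB (List.foldl pvFB (List.foldl pvFB ((pvTemplate, bs)) (pvChunkOf 19 20 pvRowsD)) (pvChunkOf 17 18 pvRowsU)) (pvChunkOf 15 16 pvRowsD)) (pvChunkOf 13 14 pvRowsU)) (pvChunkOf 11 12 pvRowsD)) (pvChunkOf 9 10 pvRowsU)) (pvChunkOf 7 8 pvRowsD)) (pvChunkOf 4 5 pvRowsU)).1 4 :=
    pvInv_step (List.foldl pvFB (List.foldl pvFB (List.foldl pvFB (List.foldl pvFB (List.foldl pvFB (List.foldl pvFB (List.foldl pvFB ((pvTemplate, bs)) (pvChunkOf 19 20 pvRowsD)) (pvChunkOf 17 18 pvRowsU)) (pvChunkOf 15 16 pvRowsD)) (pvChunkOf 13 14 pvRowsU)) (pvChunkOf 11 12 pvRowsD)) (pvChunkOf 9 10 pvRowsU)) (pvChunkOf 7 8 pvRowsD)) (pvChunkOf 4 5 pvRowsU) 4 hs7 (by norm_num) (by decide) (by decide)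
      (pvInv_mono (by norm_num) hi7)
  have h9 : ∀ q ∈ pvRowsD, pvRead (List.foldl pvFB (List.foldl pvFB (List.foldl pvFB (List.foldl pvFB (List.foldl pvFB (List.foldl pvFB (List.foldl pvFB (List.foldl pvFB ((pvTemplate, bs)) (pvChunkOf 19 20 pvRowsD)) (pvChunkOf 17 18 pvRowsU)) (pvChunkOf 15 16 pvRowsD)) (pvChunkOf 13 14 pvRowsU)) (pvChunkOf 11 12 pvRowsD)) (pvChunkOf 9 10 pvRowsU)) (pvChunkOf 7 8 pvRowsD)) (pvChunkOf 4 5 pvRowsU)).1 q 2 = pvRead pvTemplate q 2 ∧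
      pvRead (List.foldl pvFB (List.foldl pvFB (List.foldl pvFB (List.foldl pvFB (List.foldl pvFB (List.foldl pvFB (List.foldl pvFB (List.foldl pvFB ((pvTemplate, bs)) (pvChunkOf 19 20 pvRowsD)) (pvChunkOf 17 18 pvRowsU)) (pvChunkOf 15 16 pvRowsD)) (pvChunkOf 13 14 pvRowsU)) (pvChunkOf 11 12 pvRowsD)) (pvChunkOf 9 10 pvRowsU)) (pvChunkOf 7 8 pvRowsD)) (pvChunkOf 4 5 pvRowsU)).1 q 3 = pvRead pvTemplate q 3 := fun q hq =>
    ⟨hi8 q 2 (pvRowsD_bound q hq).1 (pvRowsD_bound q hq).2 (by norm_num) (by norm_num),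
     hi8 q 3 (pvRowsD_bound q hq).1 (pvRowsD_bound q hq).2 (by norm_num) (by norm_num)⟩
  rw [pvCol2 (List.foldl pvFB (List.foldl pvFB (List.foldl pvFB (List.foldl pvFB (List.foldl pvFB (List.foldl pvFB (List.foldl pvFB (List.foldl pvFB ((pvTemplate, bs)) (pvChunkOf 19 20 pvRowsD)) (pvChunkOf 17 18 pvRowsU)) (pvChunkOf 15 16 pvRowsD)) (pvChunkOf 13 14 pvRowsU)) (pvChunkOf 11 12 pvRowsD)) (pvChunkOf 9 10 pvRowsU)) (pvChunkOf 7 8 pvRowsD)) (pvChunkOf 4 5 pvRowsU)) hs8 h9]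
  have hs9 : pvShape (List.foldl pvFB (List.foldl pvFB (List.foldl pvFB (List.foldl pvFB (List.foldl pvFB (List.foldl pvFB (List.foldl pvFB (List.foldl pvFB (List.foldl pvFB ((pvTemplate, bs)) (pvChunkOf 19 20 pvRowsD)) (pvChunkOf 17 18 pvRowsU)) (pvChunkOf 15 16 pvRowsD)) (pvChunkOf 13 14 pvRowsU)) (pvChunkOf 11 12 pvRowsD)) (pvChunkOf 9 10 pvRowsU)) (pvChunkOf 7 8 pvRowsD)) (pvChunkOf 4 5 pvRowsU)) (pvChunkOf 2 3 pvRowsD)).1 :=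
    pvShape_foldl (pvChunkOf 2 3 pvRowsD) (List.foldl pvFB (List.foldl pvFB (List.foldl pvFB (List.foldl pvFB (List.foldl pvFB (List.foldl pvFB (List.foldl pvFB (List.foldl pvFB ((pvTemplate, bs)) (pvChunkOf 19 20 pvRowsD)) (pvChunkOf 17 18 pvRowsU)) (pvChunkOf 15 16 pvRowsD)) (pvChunkOf 13 14 pvRowsU)) (pvChunkOf 11 12 pvRowsD)) (pvChunkOf 9 10 pvRowsU)) (pvChunkOf 7 8 pvRowsD)) (pvChunkOf 4 5 pvRowsU)) hs8 (by decide)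
  have hi9 : pvInv (List.foldl pvFB (List.foldl pvFB (List.foldl pvFB (List.foldl pvFB (List.foldl pvFB (List.foldl pvFB (List.foldl pvFB (List.foldl pvFB (List.foldl pvFB ((pvTemplate, bs)) (pvChunkOf 19 20 pvRowsD)) (pvChunkOf 17 18 pvRowsU)) (pvChunkOf 15 16 pvRowsD)) (pvChunkOf 13 14 pvRowsU)) (pvChunkOf 11 12 pvRowsD)) (pvChunkOf 9 10 pvRowsU)) (pvChunkOf 7 8 pvRowsD)) (pvChunkOf 4 5 pvRowsU)) (pvChunkOf 2 3 pvRowsD)).1 2 :=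
    pvInv_step (List.foldl pvFB (List.foldl pvFB (List.foldl pvFB (List.foldl pvFB (List.foldl pvFB (List.foldl pvFB (List.foldl pvFB (List.foldl pvFB ((pvTemplate, bs)) (pvChunkOf 19 20 pvRowsD)) (pvChunkOf 17 18 pvRowsU)) (pvChunkOf 15 16 pvRowsD)) (pvChunkOf 13 14 pvRowsU)) (pvChunkOf 11 12 pvRowsD)) (pvChunkOf 9 10 pvRowsU)) (pvChunkOf 7 8 pvRowsD)) (pvChunkOf 4 5 pvRowsU)) (pvChunkOf 2 3 pvRowsD) 2 hs8 (by norm_num) (by decide) (by decide)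
      (pvInv_mono (by norm_num) hi8)
  have h10 : ∀ q ∈ pvRowsU, pvRead (List.foldl pvFB (List.foldl pvFB (List.foldl pvFB (List.foldl pvFB (List.foldl pvFB (List.foldl pvFB (List.foldl pvFB (List.foldl pvFB (List.foldl pvFB ((pvTemplate, bs)) (pvChunkOf 19 20 pvRowsD)) (pvChunkOf 17 18 pvRowsU)) (pvChunkOf 15 16 pvRowsD)) (pvChunkOf 13 14 pvRowsU)) (pvChunkOf 11 12 pvRowsD)) (pvChunkOf 9 10 pvRowsU)) (pvChunkOf 7 8 pvRowsD)) (pvChunkOf 4 5 pvRowsU)) (pvChunkOf 2 3 pvRowsD)).1 q 0 = pvRead pvTemplate q 0 ∧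
      pvRead (List.foldl pvFB (List.foldl pvFB (List.foldl pvFB (List.foldl pvFB (List.foldl pvFB (List.foldl pvFB (List.foldl pvFB (List.foldl pvFB (List.foldl pvFB ((pvTemplate, bs)) (pvChunkOf 19 20 pvRowsD)) (pvChunkOf 17 18 pvRowsU)) (pvChunkOf 15 16 pvRowsD)) (pvChunkOf 13 14 pvRowsU)) (pvChunkOf 11 12 pvRowsD)) (pvChunkOf 9 10 pvRowsU)) (pvChunkOf 7 8 pvRowsD)) (pvChunkOf 4 5 pvRowsU)) (pvChunkOf 2 3 pvRowsD)).1 q 1 = pvRead pvTemplate q 1 := fun q hq =>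
    ⟨hi9 q 0 (pvRowsU_bound q hq).1 (pvRowsU_bound q hq).2 (by norm_num) (by norm_num),
     hi9 q 1 (pvRowsU_bound q hq).1 (pvRowsU_bound q hq).2 (by norm_num) (by norm_num)⟩
  rw [pvCol1 (List.foldl pvFB (List.foldl pvFB (List.foldl pvFB (List.foldl pvFB (List.foldl pvFB (List.foldl pvFB (List.foldl pvFB (List.foldl pvFB (List.foldl pvFB ((pvTemplate, bs)) (pvChunkOf 19 20 pvRowsD)) (pvChunkOf 17 18 pvRowsU)) (pvChunkOf 15 16 pvRowsD)) (pvChunkOf 13 14 pvRowsU)) (pvChunkOf 11 12 pvRowsD)) (pvChunkOf 9 10 pvRowsU)) (pvChunkOf 7 8 pvRowsD)) (pvChunkOf 4 5 pvRowsU)) (pvChunkOf 2 3 pvRowsD)) hs9 h10]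


theorem pvA_eq (p : List Int) :
    make_QR_version1 p
      = (List.foldl pvFB (pvTemplate, appendToWhiteSpace p) pvPS).1 := by
  unfold make_QR_version1 pvPS
  rw [show PySem.List.pyRange 10 0 (-1) = [10, 9, 8, 7, 6, 5, 4, 3, 2, 1] from by decide]
  rw [pvAB (appendToWhiteSpace p)]

-- B's output with the dict loop named
theorem pvB_eq (p : List Int) :
    make_QR_version1_alt p
      = (PySem.List.pyRange 0 21 1).map (fun r =>
          (PySem.List.pyRange 0 21 1).map (fun c =>
            match pvIdxDict.get? (r, c) with
            | some i => PySem.List.pyGetD (padPayload p) i 0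
            | none => tmplCell r c)) := rfl

theorem pvRange21 : PySem.List.pyRange 0 21 1 = (List.range 21).map (fun n => ((n : Nat) : Int)) := by decide

-- ===== VERDICT =====
theorem make_QR_version1_spec : Claim_equal_make_QR_version1 := by
  intro p _
  unfold Spec_make_QR_version1
  rw [pvA_eq, pvB_eq, pvPad_eq, pvPS_lit, pvRange21]
  generalize padPayload p = bits
  generalize hG : (List.foldl pvFB (pvTemplate, bits) pvPSLit).1 = G
  have hsh : pvShape G := hG ▸
    pvShape_foldl pvPSLit (pvTemplate, bits) pvShape_template
      (fun q hq => ⟨(pvPS_bound q hq).1, (pvPS_bound q hq).2.1⟩)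
  have hcells : ∀ r : Int, 0 ≤ r → r < 21 → ∀ c : Int, 0 ≤ c → c < 21 →
      pvRead G r c = (match pvFind (r, c) pvPSLit with
        | some i => (bits.drop i).headD 0
        | none => pvRead pvTemplate r c) := by
    intro r hr0 hr1 c hc0 hc1
    exact hG ▸ pvFoldl_read pvPSLit (pvTemplate, bits) pvShape_template pvPS_bound pvPS_nodup r c hr0 hr1 hc0 hc1
  apply List.ext_getElem
  · simp [hsh.1]
  · intro r hrG hrB
    have hr21 : r < 21 := by simpa [hsh.1] using hrG
    simp only [List.getElem_map, List.getElem_range]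
    apply List.ext_getElem
    · have : G[r] ∈ G := List.getElem_mem _
      simp [hsh.2 _ this]
    · intro c hcG hcB
      have hrowlen : G[r].length = 21 := hsh.2 _ (List.getElem_mem _)
      have hc21 : c < 21 := by simpa [hrowlen] using hcG
      simp only [List.getElem_map, List.getElem_range]
      have h1 : PySem.List.pyGetD G ((r : Nat) : Int) ([] : List Int) = G[r] := by
        rw [PySem.List.pyGetD_eq_getElem _ _ (Int.natCast_nonneg _) (by simpa [hsh.1] using hrG)]
        simp
      have hread : pvRead G ((r : Nat) : Int) ((c : Nat) : Int) = G[r][c] := by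
        unfold pvRead
        rw [h1, PySem.List.pyGetD_eq_getElem _ _ (Int.natCast_nonneg _) (by simpa [hrowlen] using hcG)]
        simp
      rw [← hread,
          hcells _ (Int.natCast_nonneg _) (by exact_mod_cast hr21) _ (Int.natCast_nonneg _) (by exact_mod_cast hc21),
          pvBridge_idx (((r : Nat) : Int), ((c : Nat) : Int))]
      cases hf : pvFind (((r : Nat) : Int), ((c : Nat) : Int)) pvPSLit with
      | none => simp only [Option.map_none]; exact (pvBridge_cell r hr21 c hc21).symm
      | some i => simp only [Option.map_some]; exact (pvGetD_drop bits i).symm
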